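-- pv_equiv track=rewrite | github.com/RenzoAnc/test_g2 | main.py | espaciosblanco_inicio_final
-- ===== SOURCE A (Python) =====
-- def espaciosblanco_inicio_final(Cadena):
--     x_i = 0
--     x_f = 0
--     y = 0
--     for elemento in Cadena:
--         if elemento == " " and y == 0:
--             x_i += 1
--         elif elemento != " ":
--             y += 1
--             pass
--         elif elemento == " " and y!= 0:
--             x_f += 1
--     return x_i, x_f
-- ===== SOURCE B (Python) =====
-- from itertools import takewhile
--
-- def espaciosblanco_inicio_final(Cadena):
--     chars = list(Cadena)
--     lead = sum(1 for _ in takewhile(lambda c: c == " ", chars))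
--     total = chars.count(" ")
--     return lead, total - lead
-- ===== Notes on version B (the rewrite author's own statement) =====
-- stated objective: simpler
-- what changed: Replaces the stateful flag-driven character loop by two declarative passes: leading spaces via itertools.takewhile and total spaces via list.count, returning (lead, total - lead).
import Mathlib
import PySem

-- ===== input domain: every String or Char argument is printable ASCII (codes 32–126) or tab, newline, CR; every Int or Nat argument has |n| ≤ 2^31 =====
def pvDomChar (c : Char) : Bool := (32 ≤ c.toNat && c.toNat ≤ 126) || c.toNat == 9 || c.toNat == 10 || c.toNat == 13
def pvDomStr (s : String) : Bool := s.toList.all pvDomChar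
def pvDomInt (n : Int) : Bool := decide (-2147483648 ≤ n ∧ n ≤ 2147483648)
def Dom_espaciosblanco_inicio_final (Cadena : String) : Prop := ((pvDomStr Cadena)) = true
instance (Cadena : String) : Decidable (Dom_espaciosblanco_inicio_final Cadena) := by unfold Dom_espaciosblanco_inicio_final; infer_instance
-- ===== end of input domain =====

-- B replaces A's stateful flag loop by two declarative passes (leading-space prefix length and total space count); objective: simpler.


-- ===== PORT A =====
-- one loop iteration of A: branch order exactly as in the Python
def pvStepA (s : Int × Int × Int) (c : Char) : Int × Int × Int :=
  if c = ' ' ∧ s.2.2 = 0 then (s.1 + 1, s.2.1, s.2.2)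
  else if c ≠ ' ' then (s.1, s.2.1, s.2.2 + 1)
  else if c = ' ' ∧ s.2.2 ≠ 0 then (s.1, s.2.1 + 1, s.2.2)
  else s

def espaciosblanco_inicio_final (Cadena : String) : Int × Int :=
  let r := Cadena.toList.foldl pvStepA (0, 0, 0)
  (r.1, r.2.1)

-- ===== PORT B =====
def espaciosblanco_inicio_final_alt (Cadena : String) : Int × Int :=
  let chars := Cadena.toList
  let lead : Int := (chars.takeWhile (fun c => c = ' ')).length
  let total : Int := chars.count ' '
  (lead, total - lead)

-- ===== PRECONDITION & SPEC =====
def Spec_espaciosblanco_inicio_final (Cadena : String) (out : Int × Int) : Prop := out = espaciosblanco_inicio_final_alt Cadena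
instance (Cadena : String) (out : Int × Int) : Decidable (Spec_espaciosblanco_inicio_final Cadena out) := by unfold Spec_espaciosblanco_inicio_final; infer_instance

-- ===== CLAIM (what is proved, stated in full; the proofs are below) =====
def Claim_equal_espaciosblanco_inicio_final : Prop := ∀ (Cadena : String), Dom_espaciosblanco_inicio_final Cadena → Spec_espaciosblanco_inicio_final Cadena (espaciosblanco_inicio_final Cadena)

-- ===== LEMMAS AND PROOFS =====

-- once y > 0, x_i is frozen and x_f counts every further space
theorem pvFoldA_pos (l : List Char) (xi xf y : Int) (hy : 0 < y) :
    (l.foldl pvStepA (xi, xf, y)).1 = xi ∧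
    (l.foldl pvStepA (xi, xf, y)).2.1 = xf + (l.count ' ' : Int) := by
  induction l generalizing xf y with
  | nil => simp
  | cons c t ih =>
    by_cases hc : c = ' '
    · have : pvStepA (xi, xf, y) c = (xi, xf + 1, y) := by
        simp [pvStepA, hc, hy.ne']
      simp only [List.foldl_cons, this]
      obtain ⟨h1, h2⟩ := ih (xf + 1) y hy
      refine ⟨h1, ?_⟩
      rw [h2]
      simp [List.count_cons, hc]
      push_cast; ring
    · have : pvStepA (xi, xf, y) c = (xi, xf, y + 1) := by
        simp [pvStepA, hc]
      simp only [List.foldl_cons, this]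
      obtain ⟨h1, h2⟩ := ih xf (y + 1) (by omega)
      refine ⟨h1, h2.trans ?_⟩
      simp [List.count_cons, hc]

-- with y = 0, x_i accumulates the leading spaces and x_f the remaining spaces
theorem pvFoldA_zero (l : List Char) (xi xf : Int) :
    (l.foldl pvStepA (xi, xf, 0)).1 = xi + ((l.takeWhile (fun c => c = ' ')).length : Int) ∧
    (l.foldl pvStepA (xi, xf, 0)).2.1 = xf + (l.count ' ' : Int) - ((l.takeWhile (fun c => c = ' ')).length : Int) := by
  induction l generalizing xi with
  | nil => simp
  | cons c t ih =>
    by_cases hc : c = ' '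
    · have : pvStepA (xi, xf, 0) c = (xi + 1, xf, 0) := by simp [pvStepA, hc]
      simp only [List.foldl_cons, this]
      obtain ⟨h1, h2⟩ := ih (xi + 1)
      constructor
      · rw [h1]; simp [List.takeWhile_cons, hc]; ring
      · rw [h2]; simp [List.takeWhile_cons, List.count_cons, hc]; ring
    · have : pvStepA (xi, xf, 0) c = (xi, xf, 1) := by simp [pvStepA, hc]
      simp only [List.foldl_cons, this]
      obtain ⟨h1, h2⟩ := pvFoldA_pos t xi xf 1 (by omega)
      constructor
      · rw [h1]; simp [List.takeWhile_cons, hc]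
      · rw [h2]; simp [List.takeWhile_cons, List.count_cons, hc]

-- ===== VERDICT (by name: the statement is the Claim_ definition above) =====
theorem espaciosblanco_inicio_final_spec : Claim_equal_espaciosblanco_inicio_final := by
  intro Cadena _
  unfold Spec_espaciosblanco_inicio_final espaciosblanco_inicio_final espaciosblanco_inicio_final_alt
  obtain ⟨h1, h2⟩ := pvFoldA_zero Cadena.toList 0 0
  simp only [h1, h2, zero_add]
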